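-- pv_equiv track=rewrite | github.com/MrBrantCode/unitest_baseline | mut_generate/mist_train_taco/taco_9542/solution.py | find_minimal_m
-- ===== SOURCE A (Python) =====
-- def find_minimal_m(n, x):
--     if n == x:
--         return n
--
--     n_binary = format(n, 'b')
--     x_binary = format(x, 'b')
--
--     # Ensure both binary strings are of the same length
--     if len(x_binary) < len(n_binary):
--         x_binary = '0' * (len(n_binary) - len(x_binary)) + x_binary
--     if len(n_binary) < len(x_binary):
--         n_binary = '0' * (len(x_binary) - len(n_binary)) + n_binary
--
--     diff_idx = 0
--     while n_binary[diff_idx] == x_binary[diff_idx]: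
--         diff_idx += 1
--
--     if x_binary[diff_idx] == '1':
--         return -1
--
--     if '1' in x_binary[diff_idx:]:
--         return -1
--
--     if diff_idx == 0:
--         return int('1' + '0' * len(n_binary), 2)
--
--     if n_binary[diff_idx - 1] != '0':
--         return -1
--
--     return int(n_binary[:diff_idx - 1] + '1' + '0' * (len(n_binary) - diff_idx), 2)
-- ===== SOURCE B (Python) =====
-- def find_minimal_m(n, x):
--     # Simulate the sequence of reachable values: repeatedly jump m to the next
--     # point where the running AND of the range [n, m] drops its lowest 1-run.
--     m = cur = n
--     while cur > x and cur > 0: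
--         low = cur - (cur & (cur - 1))   # lowest set bit of cur
--         m = cur + low                   # smallest m at which the AND drops further
--         cur &= m
--     return m if cur == x else -1
-- ===== Notes on version B (the rewrite author's own statement) =====
-- stated objective: alternative
-- what changed: Instead of locating the highest differing bit of n and x and validating/constructing the answer from it (A's binary-string analysis), B simulates the underlying process: it iterates the sequence of reachable values, at each step clearing the lowest 1-run of the current value and jumping m to the point where the range-AND drops, stopping when the value reaches or passes x.
-- outside the precondition, e.g. on find_minimal_m(-5, 0): A returns 16, B returns -1; on find_minimal_m(-5, -4): A returns -6, B returns -1
import Mathlib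
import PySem

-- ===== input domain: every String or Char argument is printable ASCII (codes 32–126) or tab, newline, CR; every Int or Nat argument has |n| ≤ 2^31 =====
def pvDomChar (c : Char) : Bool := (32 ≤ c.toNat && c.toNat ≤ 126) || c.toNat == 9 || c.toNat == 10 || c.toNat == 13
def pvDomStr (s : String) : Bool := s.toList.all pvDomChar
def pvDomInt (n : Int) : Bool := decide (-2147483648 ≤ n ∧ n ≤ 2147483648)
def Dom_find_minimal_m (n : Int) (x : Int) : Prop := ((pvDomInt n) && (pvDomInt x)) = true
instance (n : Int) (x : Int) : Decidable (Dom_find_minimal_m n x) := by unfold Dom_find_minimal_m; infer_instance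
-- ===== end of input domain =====

-- B replaces A's binary-string analysis of the highest differing bit by a loop that
-- simulates the process itself: it repeatedly clears the lowest 1-run of the current
-- value and advances m to where the drop happens (objective: alternative).

-- ===== PORT A =====

-- the `while n_binary[diff_idx] == x_binary[diff_idx]: diff_idx += 1` loop: first index
-- where the two strings differ (under Pre_ the strings always differ before either ends)
def pvDiffIdx : List Char → List Char → Nat
  | a :: as, b :: bs => if a = b then pvDiffIdx as bs + 1 else 0
  | _, _ => 0

-- int(s, 2), hand-ported step for step for exactly the strings A builds here: an optional
-- leading '-' followed by '0'/'1' digits (no whitespace/underscores/'0b' prefix occurs),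
-- on which this fold is exact
def pvBinVal (cs : List Char) : Int :=
  cs.foldl (fun a c => 2 * a + (if c = '1' then 1 else 0)) 0

def pvInt2 : List Char → Int
  | '-' :: r => -(pvBinVal r)
  | cs => pvBinVal cs

def find_minimal_m (n : Int) (x : Int) : Int :=
  if n = x then n
  else
    let nb0 := PySem.Int.toBinChars n
    let xb0 := PySem.Int.toBinChars x
    let xb := if xb0.length < nb0.length then List.replicate (nb0.length - xb0.length) '0' ++ xb0 else xb0
    let nb := if nb0.length < xb.length then List.replicate (xb.length - nb0.length) '0' ++ nb0 else nb0
    let d := pvDiffIdx nb xb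
    -- indexing is always in range under Pre_: the padded strings differ at position d
    if xb.getD d '!' = '1' then -1
    else if '1' ∈ xb.drop d then -1
    else if d = 0 then pvInt2 ('1' :: List.replicate nb.length '0')
    else if ¬ (nb.getD (d - 1) '!' = '0') then -1
    else pvInt2 (nb.take (d - 1) ++ '1' :: List.replicate (nb.length - d) '0')

-- ===== PORT B =====

-- the `while cur > x and cur > 0` loop of B, with a structural fuel counter as the
-- totality guard (each iteration strictly decreases cur, so cur+1 steps always suffice;
-- proved in pvGoBFuel_eq below)
def pvGoBFuel : Nat → Int → Int → Int → Int
  | 0, x, m, cur => if cur = x then m else -1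
  | f + 1, x, m, cur =>
    if x < cur ∧ 0 < cur then
      let low := cur - PySem.Int.band cur (cur - 1)
      pvGoBFuel f x (cur + low) (PySem.Int.band cur (cur + low))
    else if cur = x then m else -1

def find_minimal_m_alt (n : Int) (x : Int) : Int := pvGoBFuel (n.toNat + 1) x n n

-- ===== PRECONDITION & SPEC =====

-- Pre_ excludes n < 0, a corner outside the problem's natural domain (the task is about
-- the binary representation of a nonnegative n): there format(n,'b') carries a '-' sign
-- character that A's character-wise comparison treats as a digit, and neither A's values
-- nor B's -1 is the specified answer.
def Pre_find_minimal_m (n : Int) (x : Int) : Prop := 0 ≤ n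
instance (n : Int) (x : Int) : Decidable (Pre_find_minimal_m n x) := by unfold Pre_find_minimal_m; infer_instance

def pvWitness_find_minimal_m : Int × Int := (5, 4)

def Spec_find_minimal_m (n : Int) (x : Int) (out : Int) : Prop := out = find_minimal_m_alt n x
instance (n : Int) (x : Int) (out : Int) : Decidable (Spec_find_minimal_m n x out) := by unfold Spec_find_minimal_m; infer_instance

-- ===== CLAIM (what is proved, stated in full; the proofs are below) =====
def Claim_equal_find_minimal_m : Prop := ∀ (n : Int) (x : Int), Dom_find_minimal_m n x → Pre_find_minimal_m n x → Spec_find_minimal_m n x (find_minimal_m n x)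

-- ===== LEMMAS AND PROOFS =====

-- proof-side bridge: the closed bit-arithmetic form both programs are proved equal to
def pvAltBit (n : Int) (x : Int) : Int :=
  if n = x then n
  else if x < 0 ∨ n < x then -1
  else
    let pos := PySem.Int.bitLength (PySem.Int.bxor n x) - 1
    if PySem.Int.band x ((1 : Int) <<< (pos + 1) - 1) ≠ 0 then -1
    else
      let L := PySem.Int.bitLength n
      if pos = L - 1 then (1 : Int) <<< L
      else if PySem.Int.band (n >>> (pos + 1)) 1 ≠ 0 then -1
      else ((n >>> (pos + 2)) <<< (pos + 2)) + ((1 : Int) <<< (pos + 1))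

-- (A-side machinery, unchanged)
-- MSB-first characters of the low w bits of v (proof-side model of A's padded strings)
def pvBitsF : Nat → Nat → List Char
  | 0, _ => []
  | w + 1, v => (if (v >>> w) % 2 = 1 then '1' else '0') :: pvBitsF w v

-- Nat-valued binary value of a digit string
def pvValN (cs : List Char) : Nat :=
  cs.foldl (fun a c => 2 * a + (if c = '1' then 1 else 0)) 0

theorem pvBitsF_length (w v : Nat) : (pvBitsF w v).length = w := by
  induction w with
  | zero => rfl
  | succ w ih => simp [pvBitsF, ih]

theorem pvBitsF_split (u j v : Nat) :
    pvBitsF (u + j) v = pvBitsF u (v >>> j) ++ pvBitsF j v := by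
  induction u with
  | zero => simp [pvBitsF]
  | succ u ih =>
    rw [show u + 1 + j = (u + j) + 1 from by omega]
    simp only [pvBitsF, ih, ← Nat.shiftRight_add]
    simp [Nat.add_comm j u]

theorem pvBitsF_zero_val (w : Nat) : pvBitsF w 0 = List.replicate w '0' := by
  induction w with
  | zero => rfl
  | succ w ih => simp [pvBitsF, ih, List.replicate_succ]

theorem pvSize_succ (v : Nat) (hv : 0 < v) : Nat.size v = Nat.size (v / 2) + 1 := by
  rcases Nat.eq_zero_or_pos (v / 2) with h | h
  · have : v = 1 := by omega
    subst this; simp [h, Nat.size_one]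
  · apply Nat.le_antisymm
    · rw [Nat.size_le]
      have h1 := Nat.lt_size_self (v / 2)
      have h2 : v < 2 * 2 ^ Nat.size (v / 2) := by omega
      calc v < 2 * 2 ^ Nat.size (v/2) := h2
        _ = 2 ^ (Nat.size (v/2) + 1) := by ring
    · have hs : 0 < Nat.size (v / 2) := by rw [Nat.size_pos]; exact h
      have h2 : 2 ^ (Nat.size (v/2) - 1) ≤ v / 2 := by rw [← Nat.lt_size]; omega
      have h3 : 2 ^ (Nat.size (v/2)) ≤ v := by
        have h4 : 2 ^ (Nat.size (v/2)) = 2 * 2 ^ (Nat.size (v/2) - 1) := by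
          rw [← Nat.pow_succ']; congr 1; omega
        omega
      have := (Nat.lt_size (m := Nat.size (v/2)) (n := v)).2 h3
      omega

theorem pvToDigitsCore (v : Nat) : ∀ (f : Nat) (acc : List Char), 0 < v → v < f →
    Nat.toDigitsCore 2 f v acc = pvBitsF (Nat.size v) v ++ acc := by
  induction v using Nat.strong_induction_on with
  | _ v ih =>
    intro f acc hv hf
    match f with
    | g + 1 =>
      rw [Nat.toDigitsCore]
      by_cases h0 : v / 2 = 0
      · have hv1 : v = 1 := by omega
        subst hv1
        simp [h0, Nat.size_one, pvBitsF, Nat.digitChar]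
      · simp only [h0, if_neg]
        rw [ih (v / 2) (by omega) g _ (by omega) (by omega)]
        rw [pvSize_succ v hv]
        rw [pvBitsF_split (Nat.size (v/2)) 1 v]
        have hb1 : pvBitsF 1 v = [if v % 2 = 1 then '1' else '0'] := by
          simp [pvBitsF]
        have hdg : Nat.digitChar (v % 2) = (if v % 2 = 1 then '1' else '0') := by
          rcases Nat.mod_two_eq_zero_or_one v with h | h <;> simp [h, Nat.digitChar]
        have hsr : v >>> 1 = v / 2 := by simp [Nat.shiftRight_eq_div_pow]
        simp [hb1, hdg, hsr]
    | 0 => omega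

theorem pvToDigits_eq (v : Nat) : Nat.toDigits 2 v = if v = 0 then ['0'] else pvBitsF (Nat.size v) v := by
  rcases Nat.eq_zero_or_pos v with h | h
  · subst h; rfl
  · rw [Nat.toDigits, pvToDigitsCore v (v+1) [] h (by omega)]
    simp [Nat.pos_iff_ne_zero.mp h]

theorem pvMem_one_bitsF (w : Nat) : ∀ v, '1' ∈ pvBitsF w v ↔ v % 2 ^ w ≠ 0 := by
  induction w with
  | zero => intro v; simp [pvBitsF, Nat.mod_one]
  | succ w ih =>
    intro v
    have hp : 0 < 2^w := Nat.two_pow_pos w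
    have key : v % 2^(w+1) = v % 2^w + 2^w * (v / 2^w % 2) := by
      rw [Nat.pow_succ, Nat.mod_mul]
    have hm2 : v / 2^w % 2 = 0 ∨ v / 2^w % 2 = 1 := Nat.mod_two_eq_zero_or_one _
    simp only [pvBitsF, List.mem_cons, ih, Nat.shiftRight_eq_div_pow]
    rcases hm2 with h | h
    · rw [h, mul_zero, Nat.add_zero] at key
      simp [key, h]
    · rw [h, mul_one] at key
      have h1 : (1:Nat) ≠ 0 ∧ v % 2^(w+1) ≠ 0 := by
        constructor
        · decide
        · omega
      simp [h, key]

theorem pvValN_go (cs : List Char) : ∀ (a : Nat),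
    cs.foldl (fun a c => 2 * a + (if c = '1' then 1 else 0)) a = a * 2 ^ cs.length + pvValN cs := by
  induction cs with
  | nil => intro a; simp [pvValN]
  | cons c cs ih =>
    intro a
    have h2 : pvValN (c :: cs) = (if c = '1' then 1 else 0) * 2 ^ cs.length + pvValN cs := by
      show List.foldl _ _ (c :: cs) = _
      rw [List.foldl_cons, ih]
      simp
    rw [List.foldl_cons, ih, h2, List.length_cons, Nat.pow_succ]
    ring

theorem pvValN_bitsF (w : Nat) : ∀ v, pvValN (pvBitsF w v) = v % 2 ^ w := by
  induction w with
  | zero => intro v; simp [pvBitsF, pvValN, Nat.mod_one]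
  | succ w ih =>
    intro v
    have key : v % 2^(w+1) = v % 2^w + 2^w * (v / 2^w % 2) := by
      rw [Nat.pow_succ, Nat.mod_mul]
    have hfold : pvValN ((if v >>> w % 2 = 1 then '1' else '0') :: pvBitsF w v)
        = (if v >>> w % 2 = 1 then 1 else 0) * 2 ^ w + pvValN (pvBitsF w v) := by
      show List.foldl _ _ _ = _
      rw [List.foldl_cons, pvValN_go, pvBitsF_length]
      split <;> simp
    show pvValN (_ :: pvBitsF w v) = _
    show _ = v % 2^(w+1)
    rw [hfold, ih v, key, Nat.shiftRight_eq_div_pow]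
    have hm2 : v / 2^w % 2 = 0 ∨ v / 2^w % 2 = 1 := Nat.mod_two_eq_zero_or_one _
    rcases hm2 with h | h <;> rw [h] <;> simp <;> omega

theorem pvValN_append (p q : List Char) : pvValN (p ++ q) = pvValN p * 2 ^ q.length + pvValN q := by
  show List.foldl _ _ _ = _
  rw [List.foldl_append, pvValN_go]
  simp [pvValN]

theorem pvValN_replicate_zero (m : Nat) : pvValN (List.replicate m '0') = 0 := by
  induction m with
  | zero => rfl
  | succ m ih =>
    show List.foldl _ _ _ = _
    rw [List.replicate_succ, List.foldl_cons]
    simpa using ih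

theorem pvBinVal_eq (cs : List Char) : pvBinVal cs = (pvValN cs : Int) := by
  suffices h : ∀ a : Nat, cs.foldl (fun a c => 2 * a + (if c = '1' then 1 else 0)) (a : Int)
      = ((cs.foldl (fun a c => 2 * a + (if c = '1' then 1 else 0)) a : Nat) : Int) by
    simpa [pvBinVal, pvValN] using h 0
  induction cs with
  | nil => intro a; simp
  | cons c cs ih =>
    intro a
    simp only [List.foldl_cons]
    rw [show (2 * (a:Int) + (if c = '1' then 1 else 0)) = ((2*a + (if c = '1' then 1 else 0) : Nat) : Int) from by push_cast; split <;> simp]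
    rw [ih]

theorem pvBitLength_natCast' (m : Nat) : PySem.Int.bitLength (m : Int) = Nat.size m := by
  induction m using Nat.strong_induction_on with
  | _ m ih =>
    rcases Nat.eq_zero_or_pos m with h | h
    · subst h; simpa using PySem.Int.bitLength_zero
    · rw [PySem.Int.bitLength_natCast h, ih (m/2) (by omega), pvSize_succ m h]

theorem pvDiffIdx_append (p : List Char) (a b : Char) (as bs : List Char) (h : a ≠ b) :
    pvDiffIdx (p ++ a :: as) (p ++ b :: bs) = p.length := by
  induction p with
  | nil => simp [pvDiffIdx, h]
  | cons c cs ih => simp [pvDiffIdx, ih]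

theorem pvGetD_append (p : List Char) (c : Char) (t : List Char) (d : Char) :
    (p ++ c :: t).getD p.length d = c := by
  induction p with
  | nil => rfl
  | cons a as ih => simpa using ih


theorem pvToBinChars_natCast (a : Nat) :
    PySem.Int.toBinChars (a : Int) = Nat.toDigits 2 a := by
  unfold PySem.Int.toBinChars
  simp

theorem pvToBinChars_neg (m : Nat) (hm : 0 < m) :
    PySem.Int.toBinChars (-(m : Int)) = '-' :: Nat.toDigits 2 m := by
  unfold PySem.Int.toBinChars
  rw [if_pos (by exact_mod_cast Int.neg_neg_of_pos (by exact_mod_cast hm))]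
  simp

theorem pvToD_length_le (w v : Nat) (hv : v < 2 ^ w) (hw : 0 < w) :
    (Nat.toDigits 2 v).length ≤ w := by
  rw [pvToDigits_eq]
  split
  · simpa using hw
  · rw [pvBitsF_length]
    rw [Nat.size_le]
    exact hv

theorem pvPad_eq (w v : Nat) (hv : v < 2 ^ w) (hw : 0 < w) :
    List.replicate (w - (Nat.toDigits 2 v).length) '0' ++ Nat.toDigits 2 v = pvBitsF w v := by
  rw [pvToDigits_eq]
  by_cases h0 : v = 0
  · subst h0
    rw [pvBitsF_zero_val]
    simp only [if_true, List.length_cons, List.length_nil]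
    have h1 : List.replicate (w - 1) '0' ++ ['0'] = List.replicate ((w-1)+1) '0' := by
      rw [List.replicate_succ' (n := w - 1)]
    rw [show (0:Nat) + 1 = 1 from rfl, h1, show w - 1 + 1 = w from by omega, pvBitsF_zero_val]
  · rw [if_neg h0, pvBitsF_length]
    have hsz : Nat.size v ≤ w := by rw [Nat.size_le]; exact hv
    have hsplit := pvBitsF_split (w - Nat.size v) (Nat.size v) v
    rw [show w - Nat.size v + Nat.size v = w from by omega] at hsplit
    rw [hsplit]
    have hzero : v >>> Nat.size v = 0 := by
      rw [Nat.shiftRight_eq_div_pow]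
      exact Nat.div_eq_of_lt (Nat.lt_size_self v)
    rw [hzero, pvBitsF_zero_val]

theorem pvValN_one_zeros (m : Nat) : pvValN ('1' :: List.replicate m '0') = 2 ^ m := by
  show List.foldl _ _ _ = _
  rw [List.foldl_cons, pvValN_go]
  simp [pvValN_replicate_zero, List.length_replicate]

theorem pvInt2_not_neg (cs : List Char) (h : cs.head? ≠ some '-') : pvInt2 cs = pvBinVal cs := by
  match cs with
  | [] => rfl
  | c :: r =>
    unfold pvInt2
    split
    · rename_i heq
      simp at h
      cases heq
      simp at h
    · rfl

theorem pvBitsF_cons (w v : Nat) (hw : 0 < w) :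
    pvBitsF w v = (if (v >>> (w - 1)) % 2 = 1 then '1' else '0') :: pvBitsF (w - 1) v := by
  obtain ⟨w', rfl⟩ : ∃ w', w = w' + 1 := ⟨w - 1, by omega⟩
  simp [pvBitsF]

theorem pvBitsF_no_dash (w : Nat) : ∀ v, '-' ∉ pvBitsF w v := by
  induction w with
  | zero => intro v; simp [pvBitsF]
  | succ w ih =>
    intro v
    simp only [pvBitsF, List.mem_cons, not_or]
    refine ⟨?_, ih v⟩
    split <;> decide

theorem pvHead_ne_of_not_mem (cs : List Char) (h : '-' ∉ cs) : cs.head? ≠ some '-' := by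
  cases cs with
  | nil => simp
  | cons c r =>
    simp only [List.head?_cons, ne_eq, Option.some.injEq]
    intro hc
    exact h (by simp [hc])

theorem pvBitsF_head (v : Nat) (hv : 0 < v) :
    pvBitsF (Nat.size v) v = '1' :: pvBitsF (Nat.size v - 1) v := by
  have hs : 0 < Nat.size v := Nat.size_pos.mpr hv
  have h1 : 2 ^ (Nat.size v - 1) ≤ v := by rw [← Nat.lt_size]; omega
  have h2 : v < 2 ^ Nat.size v := Nat.lt_size_self v
  have h3 : v >>> (Nat.size v - 1) = 1 := by
    rw [Nat.shiftRight_eq_div_pow]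
    apply Nat.div_eq_of_lt_le
    · simpa using h1
    · have : 2 ^ Nat.size v = 2 * 2 ^ (Nat.size v - 1) := by
        rw [← Nat.pow_succ']
        congr 1
        omega
      omega
  conv_lhs => rw [show Nat.size v = (Nat.size v - 1) + 1 from by omega]
  simp [pvBitsF, h3]

theorem pvMem_one_toD (m : Nat) (hm : 0 < m) : '1' ∈ Nat.toDigits 2 m := by
  rw [pvToDigits_eq, if_neg (by omega)]
  rw [pvMem_one_bitsF]
  have := Nat.lt_size_self m
  have : m % 2 ^ Nat.size m = m := Nat.mod_eq_of_lt this
  omega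

-- structure of the highest differing bit: above it the two numbers agree, at it the
-- larger number has a 1 and the smaller a 0, and it lies inside the larger's bit-length
theorem pvXor_struct (a b : Nat) (hlt : b < a) :
    a >>> Nat.size (a ^^^ b) = b >>> Nat.size (a ^^^ b) ∧
    (a >>> (Nat.size (a ^^^ b) - 1)) % 2 = 1 ∧
    (b >>> (Nat.size (a ^^^ b) - 1)) % 2 = 0 ∧
    Nat.size (a ^^^ b) - 1 < Nat.size a := by
  set D := a ^^^ b with hD
  have hD0 : D ≠ 0 := by
    rw [hD, ne_eq, Nat.xor_eq_zero_iff]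
    omega
  set s := Nat.size D with hs
  have hs1 : 0 < s := Nat.size_pos.mpr (by omega)
  set pos := s - 1 with hpos
  have hps : pos + 1 = s := by omega
  have hDlow : 2 ^ pos ≤ D := by rw [hpos, hs, ← Nat.lt_size]; omega
  have hDhigh : D < 2 ^ s := Nat.lt_size_self D
  have hDsr : D >>> pos = 1 := by
    rw [Nat.shiftRight_eq_div_pow]
    apply Nat.div_eq_of_lt_le
    · simpa using hDlow
    · have h2 : 2 ^ s = 2 * 2 ^ pos := by rw [← hps, Nat.pow_succ]; ring
      omega
  set u := a >>> pos with hu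
  set v := b >>> pos with hv
  have hxor : u ^^^ v = 1 := by
    rw [hu, hv, ← Nat.shiftRight_xor_distrib, ← hD, hDsr]
  have hhalf : u >>> 1 = v >>> 1 := by
    have h1 : (u ^^^ v) >>> 1 = 0 := by rw [hxor]; rfl
    rw [Nat.shiftRight_xor_distrib] at h1
    exact Nat.xor_eq_zero_iff.mp h1
  have hne_uv : u ≠ v := by
    intro hEq
    rw [hEq, Nat.xor_self] at hxor
    omega
  have hu2 : u = 2 * (u >>> 1) + u % 2 := by rw [Nat.shiftRight_one]; omega
  have hv2 : v = 2 * (v >>> 1) + v % 2 := by rw [Nat.shiftRight_one]; omega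
  have hum : u % 2 < 2 := Nat.mod_lt _ (by omega)
  have hvm : v % 2 < 2 := Nat.mod_lt _ (by omega)
  have hP : 0 < 2 ^ pos := Nat.two_pow_pos pos
  have hadiv : a = u * 2 ^ pos + a % 2 ^ pos := by
    rw [hu, Nat.shiftRight_eq_div_pow]
    rw [Nat.mul_comm]
    exact (Nat.div_add_mod a (2 ^ pos)).symm
  have hbdiv : b = v * 2 ^ pos + b % 2 ^ pos := by
    rw [hv, Nat.shiftRight_eq_div_pow]
    rw [Nat.mul_comm]
    exact (Nat.div_add_mod b (2 ^ pos)).symm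
  have hamod : a % 2 ^ pos < 2 ^ pos := Nat.mod_lt _ hP
  have hbmod : b % 2 ^ pos < 2 ^ pos := Nat.mod_lt _ hP
  have hbit : u % 2 = 1 ∧ v % 2 = 0 := by
    by_cases h1 : u % 2 = 1
    · refine ⟨h1, ?_⟩
      by_contra h2
      have hv1 : v % 2 = 1 := by omega
      exact hne_uv (by omega)
    · exfalso
      have hu0 : u % 2 = 0 := by omega
      have hv1 : v % 2 = 1 := by
        by_contra h2
        exact hne_uv (by omega)
      have hvu : v = u + 1 := by omega
      have hmul : (u + 1) * 2 ^ pos = u * 2 ^ pos + 2 ^ pos := by ring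
      rw [hvu] at hbdiv
      omega
  refine ⟨?_, hbit.1, hbit.2, ?_⟩
  · rw [← hps, Nat.shiftRight_add, Nat.shiftRight_add, ← hu, ← hv, hhalf]
  · rw [Nat.lt_size]
    have hu1 : 1 ≤ u := by omega
    have : 2 ^ pos ≤ u * 2 ^ pos := Nat.le_mul_of_pos_left _ (by omega)
    omega

-- the padded string built by A for value v against target width w is pvBitsF w v
theorem pvPadded_eq (w v : Nat) (hv : v < 2 ^ w) (hw : 0 < w) :
    (if (Nat.toDigits 2 v).length < w
      then List.replicate (w - (Nat.toDigits 2 v).length) '0' ++ Nat.toDigits 2 v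
      else Nat.toDigits 2 v) = pvBitsF w v := by
  split
  · exact pvPad_eq w v hv hw
  · rename_i hc
    have hle := pvToD_length_le w v hv hw
    have hlen : (Nat.toDigits 2 v).length = w := by omega
    have hpad := pvPad_eq w v hv hw
    rw [hlen, Nat.sub_self, List.replicate_zero, List.nil_append] at hpad
    exact hpad

-- the three input regions of Pre_ (n ≥ 0):
theorem pv_neg_case (a m : Nat) (hm : 0 < m) (hne : (a : Int) ≠ -(m : Int)) :
    find_minimal_m (a : Int) (-(m : Int)) = -1 := by
  have hm1 : '1' ∈ Nat.toDigits 2 m := pvMem_one_toD m hm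
  simp only [find_minimal_m, if_neg hne, pvToBinChars_natCast a, pvToBinChars_neg m hm]
  by_cases hc : ('-' :: Nat.toDigits 2 m).length < (Nat.toDigits 2 a).length
  · -- x's string is shorter: x gets zero-padded, n starts with '1'
    rw [if_pos hc]
    rw [List.length_cons] at hc
    have hlen : (Nat.toDigits 2 a).length = (List.replicate ((Nat.toDigits 2 a).length - ('-' :: Nat.toDigits 2 m).length) '0' ++ '-' :: Nat.toDigits 2 m).length := by
      simp only [List.length_append, List.length_replicate, List.length_cons]
      omega
    rw [if_neg (show ¬ ((Nat.toDigits 2 a).length < (List.replicate ((Nat.toDigits 2 a).length - ('-' :: Nat.toDigits 2 m).length) '0' ++ '-' :: Nat.toDigits 2 m).length) from by omega)]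
    -- n has at least 2 binary digits, so a ≥ 2 and toDigits starts with '1'
    have ha2 : 0 < a := by
      by_contra h0
      have : a = 0 := by omega
      subst this
      rw [pvToDigits_eq] at hc
      simp at hc
    have haD : Nat.toDigits 2 a = '1' :: pvBitsF (Nat.size a - 1) a := by
      rw [pvToDigits_eq, if_neg (by omega)]
      exact pvBitsF_head a ha2
    obtain ⟨k, hk⟩ : ∃ k, (Nat.toDigits 2 a).length - ('-' :: Nat.toDigits 2 m).length = k + 1 :=
      ⟨_, (Nat.succ_pred_eq_of_pos (by rw [List.length_cons]; omega)).symm⟩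
    rw [hk, List.replicate_succ, haD, List.cons_append]
    rw [show pvDiffIdx ('1' :: pvBitsF (Nat.size a - 1) a)
        ('0' :: (List.replicate k '0' ++ '-' :: Nat.toDigits 2 m)) = 0 from by
      simp [pvDiffIdx]]
    rw [show ('0' :: (List.replicate k '0' ++ '-' :: Nat.toDigits 2 m)).getD 0 '!' = '0' from rfl]
    rw [if_neg (by decide)]
    rw [if_pos (show '1' ∈ List.drop 0 ('0' :: (List.replicate k '0' ++ '-' :: Nat.toDigits 2 m)) from by
      simp [hm1])]
  · -- x's string is at least as long: x keeps its '-' head, n's head is a digit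
    rw [if_neg hc]
    have hx : ∃ c t, (if (Nat.toDigits 2 a).length < ('-' :: Nat.toDigits 2 m).length
        then List.replicate (('-' :: Nat.toDigits 2 m).length - (Nat.toDigits 2 a).length) '0' ++ Nat.toDigits 2 a
        else Nat.toDigits 2 a) = c :: t ∧ c ≠ '-' := by
      split
      · rename_i hlt
        obtain ⟨k, hk⟩ : ∃ k, ('-' :: Nat.toDigits 2 m).length - (Nat.toDigits 2 a).length = k + 1 :=
          ⟨_, (Nat.succ_pred_eq_of_pos (by omega)).symm⟩
        rw [hk, List.replicate_succ]
        exact ⟨'0', _, rfl, by decide⟩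
      · by_cases h0 : a = 0
        · subst h0
          exact ⟨'0', [], by rw [pvToDigits_eq]; simp, by decide⟩
        · refine ⟨'1', pvBitsF (Nat.size a - 1) a, ?_, by decide⟩
          rw [pvToDigits_eq, if_neg h0]
          exact pvBitsF_head a (by omega)
    obtain ⟨c, t, hct, hcne⟩ := hx
    rw [hct]
    rw [show pvDiffIdx (c :: t) ('-' :: Nat.toDigits 2 m) = 0 from by
      simp [pvDiffIdx, hcne]]
    rw [show ('-' :: Nat.toDigits 2 m).getD 0 '!' = '-' from rfl]
    rw [if_neg (by decide)]
    rw [if_pos (show '1' ∈ List.drop 0 ('-' :: Nat.toDigits 2 m) from by simp [hm1])]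

theorem pv_gt_case (a b : Nat) (h : a < b) :
    find_minimal_m (a : Int) (b : Int) = -1 := by
  have hne : (a : Int) ≠ (b : Int) := by
    intro hEq
    rw [Nat.cast_inj] at hEq
    omega
  obtain ⟨hpref, hbitb, hbita, hposL⟩ := pvXor_struct b a h
  obtain ⟨s, hs⟩ : ∃ s, Nat.size (b ^^^ a) = s := ⟨_, rfl⟩
  obtain ⟨L, hL⟩ : ∃ L, Nat.size b = L := ⟨_, rfl⟩
  rw [hs] at hpref hbita hbitb hposL
  rw [hL] at hposL
  have hD0 : b ^^^ a ≠ 0 := by rw [ne_eq, Nat.xor_eq_zero_iff]; omega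
  have hs1 : 0 < s := by rw [← hs]; exact Nat.size_pos.mpr (by omega)
  have hsL : s ≤ L := by omega
  have hL0 : 0 < L := by omega
  have hb1 : 0 < b := by omega
  have hbL : b < 2 ^ L := by rw [← hL]; exact Nat.lt_size_self b
  have haL : a < 2 ^ L := by omega
  have hdsL : (L - s) + s = L := by omega
  have hxb : PySem.Int.toBinChars (b : Int) = pvBitsF L b := by
    rw [pvToBinChars_natCast, pvToDigits_eq, if_neg (by omega), hL]
  have hlenA := pvToD_length_le L a haL hL0
  have hsplit_b : pvBitsF L b = pvBitsF (L - s) (b >>> s) ++ ('1' :: pvBitsF (s - 1) b) := by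
    conv_lhs => rw [← hdsL]
    rw [pvBitsF_split (L - s) s b]
    congr 1
    rw [pvBitsF_cons s b hs1, if_pos hbitb]
  have hsplit_a : pvBitsF L a = pvBitsF (L - s) (b >>> s) ++ ('0' :: pvBitsF (s - 1) a) := by
    conv_lhs => rw [← hdsL]
    rw [pvBitsF_split (L - s) s a, ← hpref]
    congr 1
    rw [pvBitsF_cons s a hs1, hbita]
    norm_num
  have hPlen : (pvBitsF (L - s) (b >>> s)).length = L - s := pvBitsF_length _ _
  have hdiff : pvDiffIdx (pvBitsF L a) (pvBitsF L b) = L - s := by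
    rw [hsplit_a, hsplit_b, pvDiffIdx_append _ _ _ _ _ (by decide), hPlen]
  have hgd : (pvBitsF L b).getD (L - s) '!' = '1' := by
    rw [hsplit_b]
    have hx := pvGetD_append (pvBitsF (L - s) (b >>> s)) '1' (pvBitsF (s - 1) b) '!'
    rwa [hPlen] at hx
  simp only [find_minimal_m, if_neg hne, pvToBinChars_natCast a, hxb, pvBitsF_length]
  rw [if_neg (show ¬ (L < (Nat.toDigits 2 a).length) from by omega)]
  simp only [pvBitsF_length]
  rw [pvPadded_eq L a haL hL0]
  simp only [pvBitsF_length, lt_irrefl, if_false, hdiff, hgd]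
  simp

theorem pv_main_case (a b : Nat) (h : b < a) :
    find_minimal_m (a : Int) (b : Int) = pvAltBit (a : Int) (b : Int) := by
  have hne : (a : Int) ≠ (b : Int) := by
    intro hEq
    rw [Nat.cast_inj] at hEq
    omega
  obtain ⟨hpref, hbita, hbitb, hposL⟩ := pvXor_struct a b h
  obtain ⟨s, hs⟩ : ∃ s, Nat.size (a ^^^ b) = s := ⟨_, rfl⟩
  obtain ⟨L, hL⟩ : ∃ L, Nat.size a = L := ⟨_, rfl⟩
  rw [hs] at hpref hbita hbitb hposL
  rw [hL] at hposL
  have hD0 : a ^^^ b ≠ 0 := by rw [ne_eq, Nat.xor_eq_zero_iff]; omega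
  have hs1 : 0 < s := by rw [← hs]; exact Nat.size_pos.mpr (by omega)
  have hps : s - 1 + 1 = s := by omega
  have hsL : s ≤ L := by omega
  have hL0 : 0 < L := by omega
  have ha1 : 0 < a := by omega
  have haL : a < 2 ^ L := by rw [← hL]; exact Nat.lt_size_self a
  have hbL : b < 2 ^ L := by omega
  have hdsL : (L - s) + s = L := by omega
  -- string decompositions
  have hnb : PySem.Int.toBinChars (a : Int) = pvBitsF L a := by
    rw [pvToBinChars_natCast, pvToDigits_eq, if_neg (by omega), hL]
  have hsplit_a : pvBitsF L a = pvBitsF (L - s) (a >>> s) ++ ('1' :: pvBitsF (s - 1) a) := by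
    conv_lhs => rw [← hdsL]
    rw [pvBitsF_split (L - s) s a]
    congr 1
    rw [pvBitsF_cons s a hs1, if_pos hbita]
  have hsplit_b : pvBitsF L b = pvBitsF (L - s) (a >>> s) ++ ('0' :: pvBitsF (s - 1) b) := by
    conv_lhs => rw [← hdsL]
    rw [pvBitsF_split (L - s) s b, hpref]
    congr 1
    rw [pvBitsF_cons s b hs1, hbitb]
    norm_num
  have hPlen : (pvBitsF (L - s) (a >>> s)).length = L - s := pvBitsF_length _ _
  have hdiff : pvDiffIdx (pvBitsF L a) (pvBitsF L b) = L - s := by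
    rw [hsplit_a, hsplit_b, pvDiffIdx_append _ _ _ _ _ (by decide), hPlen]
  have hgd : (pvBitsF L b).getD (L - s) '!' = '0' := by
    rw [hsplit_b]
    have hx := pvGetD_append (pvBitsF (L - s) (a >>> s)) '0' (pvBitsF (s - 1) b) '!'
    rwa [hPlen] at hx
  have hdrop : (pvBitsF L b).drop (L - s) = '0' :: pvBitsF (s - 1) b := by
    rw [hsplit_b]
    have hx : List.drop ((pvBitsF (L - s) (a >>> s)).length)
        (pvBitsF (L - s) (a >>> s) ++ '0' :: pvBitsF (s - 1) b) = '0' :: pvBitsF (s - 1) b := by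
      simp
    rwa [hPlen] at hx
  have hmem_iff : ('1' ∈ (pvBitsF L b).drop (L - s)) ↔ b % 2 ^ s ≠ 0 := by
    rw [hdrop]
    have hx : ('0' :: pvBitsF (s - 1) b) = pvBitsF s b := by
      rw [pvBitsF_cons s b hs1, hbitb]
      norm_num
    rw [hx]
    exact pvMem_one_bitsF s b
  -- reduce port A
  simp only [find_minimal_m, if_neg hne, hnb, pvToBinChars_natCast b, pvBitsF_length]
  rw [pvPadded_eq L b hbL hL0]
  simp only [pvBitsF_length, lt_irrefl, if_false, hdiff, hgd]
  rw [if_neg (by decide : ¬ ('0' = '1'))]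
  -- reduce the bit form
  simp only [pvAltBit, if_neg hne]
  rw [if_neg (by
    push_cast
    omega : ¬ ((b : Int) < 0 ∨ (a : Int) < (b : Int)))]
  simp only [PySem.Int.bxor_natCast, pvBitLength_natCast', hs, hps, pvBitLength_natCast', hL]
  -- the shared low-bits test
  have hmask : ((1 : Int) <<< s - 1) = ((2 ^ s - 1 : Nat) : Int) := by
    rw [show ((1 : Int) <<< s) = ((1 <<< s : Nat) : Int) from rfl, Nat.one_shiftLeft]
    have := Nat.one_le_two_pow (n := s)
    omega
  have hband1 : PySem.Int.band (b : Int) ((1 : Int) <<< s - 1) = ((b % 2 ^ s : Nat) : Int) := by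
    rw [hmask, PySem.Int.band_of_nonneg (by positivity) (by positivity),
      Int.toNat_natCast, Int.toNat_natCast, Nat.and_two_pow_sub_one_eq_mod]
  rw [hband1]
  by_cases hmem : b % 2 ^ s = 0
  · -- low bits of x are clear: both continue
    rw [if_neg (show ¬ ('1' ∈ List.drop (L - s) (pvBitsF L b)) from by simp [hmem_iff, hmem])]
    rw [if_neg (show ¬ (((b % 2 ^ s : Nat) : Int) ≠ 0) from by simp [hmem])]
    by_cases hd0 : L - s = 0
    · rw [if_pos hd0, if_pos (show s - 1 = L - 1 from by omega)]
      rw [pvInt2_not_neg _ (by simp), pvBinVal_eq, pvValN_one_zeros,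
        show ((1 : Int) <<< L) = ((1 <<< L : Nat) : Int) from rfl, Nat.one_shiftLeft]
    · rw [if_neg hd0, if_neg (show ¬ (s - 1 = L - 1) from by omega)]
      have hq := pvBitsF_split (L - s - 1) 1 (a >>> s)
      rw [show L - s - 1 + 1 = L - s from by omega] at hq
      have h1b : pvBitsF 1 (a >>> s) = [if (a >>> s) % 2 = 1 then '1' else '0'] := by
        simp [pvBitsF]
      have hsr1 : (a >>> s) >>> 1 = a >>> (s + 1) := by rw [← Nat.shiftRight_add]
      have hQlen : (pvBitsF (L - s - 1) (a >>> (s + 1))).length = L - s - 1 := pvBitsF_length _ _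
      have hnb2 : pvBitsF L a = pvBitsF (L - s - 1) (a >>> (s + 1)) ++
          (if (a >>> s) % 2 = 1 then '1' else '0') :: ('1' :: pvBitsF (s - 1) a) := by
        rw [hsplit_a, hq, hsr1, h1b]
        simp
      have hgd2 : (pvBitsF L a).getD (L - s - 1) '!' = (if (a >>> s) % 2 = 1 then '1' else '0') := by
        rw [hnb2]
        have hx := pvGetD_append (pvBitsF (L - s - 1) (a >>> (s + 1)))
          (if (a >>> s) % 2 = 1 then '1' else '0') ('1' :: pvBitsF (s - 1) a) '!'
        rwa [hQlen] at hx
      have htake : List.take (L - s - 1) (pvBitsF L a) = pvBitsF (L - s - 1) (a >>> (s + 1)) := by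
        rw [hnb2]
        have hx : List.take ((pvBitsF (L - s - 1) (a >>> (s + 1))).length)
            (pvBitsF (L - s - 1) (a >>> (s + 1)) ++
              (if (a >>> s) % 2 = 1 then '1' else '0') :: ('1' :: pvBitsF (s - 1) a)) =
            pvBitsF (L - s - 1) (a >>> (s + 1)) := by
          simp
        rwa [hQlen] at hx
      have hband2 : PySem.Int.band ((a : Int) >>> s) 1 = (((a >>> s) % 2 : Nat) : Int) := by
        rw [show ((a : Int) >>> s) = ((a >>> s : Nat) : Int) from rfl,
          PySem.Int.band_of_nonneg (by positivity) (by norm_num), Int.toNat_natCast,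
          show ((1 : Int)).toNat = 1 from rfl, Nat.and_one_is_mod]
      rw [hgd2, hband2]
      by_cases hodd : (a >>> s) % 2 = 1
      · rw [if_pos (by simp [hodd]), if_pos (by simp [hodd])]
      · have hodd0 : (a >>> s) % 2 = 0 := by omega
        rw [if_neg (by simp [hodd0]), if_neg (by simp [hodd0])]
        rw [htake, show L - (L - s) = s from by omega]
        have hnodash : ('-' : Char) ∉ pvBitsF (L - s - 1) (a >>> (s + 1)) ++ '1' :: List.replicate s '0' := by
          simp [pvBitsF_no_dash, List.mem_replicate]
        rw [pvInt2_not_neg _ (pvHead_ne_of_not_mem _ hnodash), pvBinVal_eq, pvValN_append,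
          pvValN_one_zeros, pvValN_bitsF]
        have hbound : a >>> (s + 1) < 2 ^ (L - s - 1) := by
          rw [Nat.shiftRight_eq_div_pow]
          rw [Nat.div_lt_iff_lt_mul (Nat.two_pow_pos _)]
          calc a < 2 ^ L := haL
            _ = 2 ^ (L - s - 1) * 2 ^ (s + 1) := by
                rw [← Nat.pow_add]
                congr 1
                omega
        rw [Nat.mod_eq_of_lt hbound]
        rw [show s - 1 + 2 = s + 1 from by omega,
          show ((a : Int) >>> (s + 1) <<< (s + 1)) = (((a >>> (s + 1)) <<< (s + 1) : Nat) : Int) from rfl,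
          show ((1 : Int) <<< s) = ((1 <<< s : Nat) : Int) from rfl,
          Nat.one_shiftLeft, Nat.shiftLeft_eq]
        push_cast
        ring_nf
        simp [List.length_replicate]
        ring
  · -- x has a set bit at or below the divergence: both return -1
    rw [if_pos (hmem_iff.mpr hmem), if_pos (show (((b % 2 ^ s : Nat) : Int) ≠ 0) from
      fun hc => hmem (by exact_mod_cast hc))]

-- A equals the bit form on all of Pre_
theorem pvA_eq_bit (n x : Int) (hn : 0 ≤ n) : find_minimal_m n x = pvAltBit n x := by
  obtain ⟨a, rfl⟩ : ∃ a : Nat, n = (a : Int) := ⟨n.toNat, (Int.toNat_of_nonneg hn).symm⟩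
  by_cases hEq : (a : Int) = x
  · rw [← hEq]
    simp [find_minimal_m, pvAltBit]
  · by_cases hx : x < 0
    · obtain ⟨m, hm, rfl⟩ : ∃ m : Nat, 0 < m ∧ x = -(m : Int) := ⟨(-x).toNat, by omega, by omega⟩
      rw [pv_neg_case a m hm hEq]
      rw [pvAltBit, if_neg hEq, if_pos (Or.inl (by omega))]
    · obtain ⟨b, rfl⟩ : ∃ b : Nat, x = (b : Int) := ⟨x.toNat, (Int.toNat_of_nonneg (by omega)).symm⟩
      rcases lt_trichotomy b a with hba | hba | hba
      · exact pv_main_case a b hba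
      · exact absurd (by rw [hba]) hEq
      · rw [pv_gt_case a b hba]
        rw [pvAltBit, if_neg hEq, if_pos (Or.inr (by exact_mod_cast hba))]


-- ===== B-side: the loop equals the bit form =====
-- Proof-side loop without fuel (well-founded on cur), plus the bit lemmas behind its
-- termination: a positive number decomposes as H·2^t1 + (2^t1 − 2^t0), its lowest
-- 1-run, and one loop step clears exactly that run.

theorem pvTestBit_decomp (H r k : Nat) (hr : r < 2 ^ k) (j : Nat) :
    (H * 2 ^ k + r).testBit j = if j < k then r.testBit j else H.testBit (j - k) := by
  rw [Nat.mul_comm]; exact Nat.testBit_two_pow_mul_add H hr j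

theorem pvTestBit_run (t0 t1 j : Nat) (h : t0 ≤ t1) :
    (2 ^ t1 - 2 ^ t0).testBit j = decide (t0 ≤ j ∧ j < t1) := by
  have hsplit : 2 ^ t1 = 2 ^ (t1 - t0) * 2 ^ t0 := by rw [← Nat.pow_add]; congr 1; omega
  have h1 : 2 ^ t1 - 2 ^ t0 = (2 ^ (t1 - t0) - 1) * 2 ^ t0 + 0 := by
    rw [Nat.sub_mul, one_mul, ← hsplit]; omega
  rw [h1, pvTestBit_decomp _ _ _ (Nat.two_pow_pos t0) j]
  by_cases hj : j < t0
  · rw [if_pos hj, Nat.zero_testBit]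
    symm
    rw [decide_eq_false_iff_not]
    omega
  · rw [if_neg hj, Nat.testBit_two_pow_sub_one]
    exact decide_eq_decide.mpr (by omega)

theorem pvTestBit_run_pred (t0 t1 j : Nat) (h : t0 < t1) :
    (2 ^ t1 - 2 ^ t0 - 1).testBit j = decide (j < t1 ∧ j ≠ t0) := by
  have hsplit : 2 ^ t1 = 2 ^ (t1 - t0 - 1) * 2 ^ (t0 + 1) := by rw [← Nat.pow_add]; congr 1; omega
  have ht0 : (0:Nat) < 2 ^ t0 := Nat.two_pow_pos t0
  have ht01 : 2 ^ (t0 + 1) = 2 * 2 ^ t0 := by ring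
  have hle : 2 ^ (t0 + 1) ≤ 2 ^ t1 := Nat.pow_le_pow_right (by omega) (by omega)
  have h1 : 2 ^ t1 - 2 ^ t0 - 1 = (2 ^ (t1 - t0 - 1) - 1) * 2 ^ (t0 + 1) + (2 ^ t0 - 1) := by
    rw [Nat.sub_mul, one_mul, ← hsplit]; omega
  rw [h1, pvTestBit_decomp _ _ _ (by omega) j]
  by_cases hj : j < t0 + 1
  · rw [if_pos hj, Nat.testBit_two_pow_sub_one]
    exact decide_eq_decide.mpr (by omega)
  · rw [if_neg hj, Nat.testBit_two_pow_sub_one]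
    exact decide_eq_decide.mpr (by omega)

theorem pvAnd_decomp (p q r r' k : Nat) (hr : r < 2 ^ k) (hr' : r' < 2 ^ k) :
    (p * 2 ^ k + r) &&& (q * 2 ^ k + r') = (p &&& q) * 2 ^ k + (r &&& r') := by
  apply Nat.eq_of_testBit_eq
  intro j
  have hrr : r &&& r' < 2 ^ k := lt_of_le_of_lt Nat.and_le_left hr
  rw [Nat.testBit_and, pvTestBit_decomp _ _ _ hr j, pvTestBit_decomp _ _ _ hr' j,
    pvTestBit_decomp _ _ _ hrr j]
  by_cases hj : j < k
  · simp [hj, Nat.testBit_and]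
  · simp [hj, Nat.testBit_and]

theorem pvDeco (c : Nat) (hc : 0 < c) :
    ∃ H t0 t1, t0 < t1 ∧ H % 2 = 0 ∧ c = H * 2 ^ t1 + (2 ^ t1 - 2 ^ t0) := by
  induction c using Nat.strong_induction_on with
  | _ c ih =>
    by_cases he : c % 2 = 0
    · have h2 : c / 2 < c := Nat.div_lt_self hc (by omega)
      obtain ⟨H, t0, t1, ht, hH, hd⟩ := ih (c / 2) h2 (by omega)
      refine ⟨H, t0 + 1, t1 + 1, by omega, hH, ?_⟩
      have e1 : H * 2 ^ (t1 + 1) = 2 * (H * 2 ^ t1) := by ring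
      have e2 : (2:Nat) ^ (t1 + 1) = 2 * 2 ^ t1 := by ring
      have e3 : (2:Nat) ^ (t0 + 1) = 2 * 2 ^ t0 := by ring
      have hle : (2:Nat) ^ t0 ≤ 2 ^ t1 := Nat.pow_le_pow_right (by omega) (by omega)
      omega
    · by_cases hez : c / 2 = 0
      · refine ⟨0, 0, 1, by omega, by omega, ?_⟩
        simp only [Nat.zero_mul, pow_one, pow_zero]
        omega
      · by_cases heo : c / 2 % 2 = 0
        · refine ⟨c / 2, 0, 1, by omega, heo, ?_⟩
          simp only [pow_one, pow_zero]
          omega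
        · obtain ⟨H, t0, t1, ht, hH, hd⟩ := ih (c / 2) (Nat.div_lt_self hc (by omega)) (by omega)
          have ht0 : t0 = 0 := by
            by_contra h0
            obtain ⟨k, rfl⟩ : ∃ k, t0 = k + 1 := ⟨t0 - 1, by omega⟩
            obtain ⟨l, rfl⟩ : ∃ l, t1 = l + 1 := ⟨t1 - 1, by omega⟩
            have e1 : H * 2 ^ (l + 1) = 2 * (H * 2 ^ l) := by ring
            have e2 : (2:Nat) ^ (l + 1) = 2 * 2 ^ l := by ring
            have e3 : (2:Nat) ^ (k + 1) = 2 * 2 ^ k := by ring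
            have hle : (2:Nat) ^ k ≤ 2 ^ l := Nat.pow_le_pow_right (by omega) (by omega)
            omega
          subst ht0
          refine ⟨H, 0, t1 + 1, by omega, hH, ?_⟩
          have e1 : H * 2 ^ (t1 + 1) = 2 * (H * 2 ^ t1) := by ring
          have e2 : (2:Nat) ^ (t1 + 1) = 2 * 2 ^ t1 := by ring
          have e0 : (2:Nat) ^ 0 = 1 := rfl
          have h1 : (1:Nat) ≤ 2 ^ t1 := Nat.one_le_two_pow
          omega

-- the run's own step: run &&& (run − 1) clears the run's lowest bit
theorem pvRun_and_pred (t0 t1 : Nat) (ht : t0 < t1) :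
    (2 ^ t1 - 2 ^ t0) &&& (2 ^ t1 - 2 ^ t0 - 1) = 2 ^ t1 - 2 ^ (t0 + 1) := by
  apply Nat.eq_of_testBit_eq
  intro j
  rw [Nat.testBit_and, pvTestBit_run t0 t1 j (by omega), pvTestBit_run_pred t0 t1 j ht,
    pvTestBit_run (t0 + 1) t1 j (by omega), ← Bool.decide_and]
  exact decide_eq_decide.mpr (by omega)

-- bit j of H+1 for even H
theorem pvSuccBit (H i : Nat) (hH : H % 2 = 0) :
    (H + 1).testBit i = (H.testBit i || decide (i = 0)) := by
  cases i with
  | zero =>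
    simp only [Nat.testBit_eq_decide_div_mod_eq, pow_zero, Nat.div_one]
    simp; omega
  | succ i =>
    simp only [Nat.testBit_eq_decide_div_mod_eq]
    have e1 : (2:Nat) ^ (i + 1) = 2 * 2 ^ i := by ring
    have e2 : (H + 1) / 2 ^ (i + 1) = H / 2 ^ (i + 1) := by
      rw [e1, ← Nat.div_div_eq_div_mul, ← Nat.div_div_eq_div_mul]
      congr 1
      omega
    simp [e2]

theorem pvEven_and_succ (H : Nat) (hH : H % 2 = 0) : H &&& (H + 1) = H := by
  apply Nat.eq_of_testBit_eq
  intro j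
  rw [Nat.testBit_and, pvSuccBit H j hH]
  by_cases hj : j = 0
  · subst hj
    have h0 : H.testBit 0 = false := by
      simp only [Nat.testBit_eq_decide_div_mod_eq, pow_zero, Nat.div_one]
      simp; omega
    simp [h0]
  · simp [hj]

-- one loop step, on the decomposition: low = 2^t0, c + low = (H+1)·2^t1, c &&& (c+low) = H·2^t1
theorem pvStep_and_pred (H t0 t1 : Nat) (ht : t0 < t1) (hH : H % 2 = 0) :
    (H * 2 ^ t1 + (2 ^ t1 - 2 ^ t0)) &&& (H * 2 ^ t1 + (2 ^ t1 - 2 ^ t0) - 1)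
      = H * 2 ^ t1 + (2 ^ t1 - 2 ^ (t0 + 1)) := by
  have ht0 : (0:Nat) < 2 ^ t0 := Nat.two_pow_pos t0
  have hlt : (2:Nat) ^ t0 < 2 ^ t1 := Nat.pow_lt_pow_right (by omega) ht
  have h1 : H * 2 ^ t1 + (2 ^ t1 - 2 ^ t0) - 1 = H * 2 ^ t1 + (2 ^ t1 - 2 ^ t0 - 1) := by omega
  rw [h1, pvAnd_decomp _ _ _ _ _ (by omega) (by omega), Nat.and_self,
    pvRun_and_pred t0 t1 ht]

theorem pvStep_and_next (H t0 t1 : Nat) (ht : t0 < t1) (hH : H % 2 = 0) :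
    (H * 2 ^ t1 + (2 ^ t1 - 2 ^ t0)) &&& ((H + 1) * 2 ^ t1) = H * 2 ^ t1 := by
  have ht0 : (0:Nat) < 2 ^ t0 := Nat.two_pow_pos t0
  have hlt : (2:Nat) ^ t0 < 2 ^ t1 := Nat.pow_lt_pow_right (by omega) ht
  have h1 : (H + 1) * 2 ^ t1 = (H + 1) * 2 ^ t1 + 0 := by omega
  rw [h1, pvAnd_decomp _ _ _ _ _ (by omega) (Nat.two_pow_pos t1), Nat.and_zero,
    Nat.add_zero, pvEven_and_succ H hH]

theorem pvBandStep_lt (c : Nat) (hc : 0 < c) :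
    c &&& (c + (c - (c &&& (c - 1)))) < c := by
  obtain ⟨H, t0, t1, ht, hH, rfl⟩ := pvDeco c hc
  have ht0 : (0:Nat) < 2 ^ t0 := Nat.two_pow_pos t0
  have hlt : (2:Nat) ^ t0 < 2 ^ t1 := Nat.pow_lt_pow_right (by omega) ht
  have e2 : (2:Nat) ^ (t0 + 1) = 2 * 2 ^ t0 := by ring
  have hle : (2:Nat) ^ (t0 + 1) ≤ 2 ^ t1 := Nat.pow_le_pow_right (by omega) (by omega)
  rw [pvStep_and_pred H t0 t1 ht hH]
  have h2 : H * 2 ^ t1 + (2 ^ t1 - 2 ^ t0) + (H * 2 ^ t1 + (2 ^ t1 - 2 ^ t0)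
      - (H * 2 ^ t1 + (2 ^ t1 - 2 ^ (t0 + 1)))) = (H + 1) * 2 ^ t1 := by
    have e3 : (H + 1) * 2 ^ t1 = H * 2 ^ t1 + 2 ^ t1 := by ring
    omega
  rw [h2, pvStep_and_next H t0 t1 ht hH]
  omega

theorem pvBandStep_toNat_lt (cur : Int) (hc : 0 < cur) :
    (PySem.Int.band cur (cur + (cur - PySem.Int.band cur (cur - 1)))).toNat < cur.toNat := by
  obtain ⟨c, rfl⟩ : ∃ c : Nat, cur = (c : Int) := ⟨cur.toNat, (Int.toNat_of_nonneg (by omega)).symm⟩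
  have hc' : 0 < c := by exact_mod_cast hc
  have h1 : PySem.Int.band (c : Int) ((c : Int) - 1) = ((c &&& (c - 1) : Nat) : Int) := by
    rw [show ((c : Int) - 1) = ((c - 1 : Nat) : Int) from by omega,
      PySem.Int.band_of_nonneg (by positivity) (by positivity), Int.toNat_natCast, Int.toNat_natCast]
  have hle : c &&& (c - 1) ≤ c := Nat.and_le_left
  rw [h1, show ((c : Int) + ((c : Int) - ((c &&& (c - 1) : Nat) : Int)))
      = ((c + (c - (c &&& (c - 1))) : Nat) : Int) from by omega,
    PySem.Int.band_of_nonneg (by positivity) (by positivity), Int.toNat_natCast, Int.toNat_natCast,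
    Int.toNat_natCast]
  exact pvBandStep_lt c hc'

-- the `while cur > x and cur > 0` loop of B
def pvGoB (x m cur : Int) : Int :=
  if h : x < cur ∧ 0 < cur then
    let low := cur - PySem.Int.band cur (cur - 1)
    pvGoB x (cur + low) (PySem.Int.band cur (cur + low))
  else if cur = x then m else -1
termination_by cur.toNat
decreasing_by exact pvBandStep_toNat_lt cur h.2

-- Nat form of the bit-arithmetic branch (0 ≤ b < a)
def pvCoreN (a b : Nat) : Int :=
  if b % 2 ^ Nat.size (a ^^^ b) ≠ 0 then -1
  else if Nat.size (a ^^^ b) = Nat.size a then ((2 ^ Nat.size a : Nat) : Int)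
  else if a / 2 ^ Nat.size (a ^^^ b) % 2 = 1 then -1
  else ((a / 2 ^ (Nat.size (a ^^^ b) + 1) * 2 ^ (Nat.size (a ^^^ b) + 1)
          + 2 ^ Nat.size (a ^^^ b) : Nat) : Int)

theorem pvXor_decomp (p q r r' k : Nat) (hr : r < 2 ^ k) (hr' : r' < 2 ^ k) :
    (p * 2 ^ k + r) ^^^ (q * 2 ^ k + r') = (p ^^^ q) * 2 ^ k + (r ^^^ r') := by
  apply Nat.eq_of_testBit_eq
  intro j
  have hrr : r ^^^ r' < 2 ^ k := Nat.xor_lt_two_pow hr hr'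
  rw [Nat.testBit_xor, pvTestBit_decomp _ _ _ hr j, pvTestBit_decomp _ _ _ hr' j,
    pvTestBit_decomp _ _ _ hrr j]
  by_cases hj : j < k
  · simp [hj, Nat.testBit_xor]
  · simp [hj, Nat.testBit_xor]

theorem pvSize_of_bounds (v s : Nat) (hs : 0 < s) (h1 : 2 ^ (s - 1) ≤ v) (h2 : v < 2 ^ s) :
    Nat.size v = s := by
  apply le_antisymm
  · exact Nat.size_le.mpr h2
  · have h3 : s - 1 < Nat.size v := (Nat.lt_size).mpr h1
    omega

theorem pvSize_decomp (q k r : Nat) (hq : 0 < q) (hr : r < 2 ^ k) :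
    Nat.size (q * 2 ^ k + r) = Nat.size q + k := by
  have hq1 : 0 < Nat.size q := Nat.size_pos.mpr hq
  apply pvSize_of_bounds _ _ (by omega)
  · have h1 : 2 ^ (Nat.size q - 1) ≤ q := by rw [← Nat.lt_size]; omega
    have h2 : (2:Nat) ^ (Nat.size q + k - 1) = 2 ^ (Nat.size q - 1) * 2 ^ k := by
      rw [← Nat.pow_add]; congr 1; omega
    have h3 : 2 ^ (Nat.size q - 1) * 2 ^ k ≤ q * 2 ^ k := Nat.mul_le_mul_right _ h1
    omega
  · have h1 : q < 2 ^ Nat.size q := Nat.lt_size_self q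
    have h2 : (q + 1) * 2 ^ k = q * 2 ^ k + 2 ^ k := by ring
    have h3 : (q + 1) * 2 ^ k ≤ 2 ^ Nat.size q * 2 ^ k := Nat.mul_le_mul_right _ (by omega)
    have h4 : (2:Nat) ^ (Nat.size q + k) = 2 ^ Nat.size q * 2 ^ k := by rw [Nat.pow_add]
    omega

theorem pvSize_pred_pow (m : Nat) (hm : 0 < m) : Nat.size (2 ^ m - 1) = m := by
  have h1 : (2:Nat) ^ m = 2 * 2 ^ (m - 1) := by rw [← Nat.pow_succ']; congr 1; omega
  have h2 : (0:Nat) < 2 ^ (m - 1) := Nat.two_pow_pos _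
  have h3 : (0:Nat) < 2 ^ m := Nat.two_pow_pos _
  exact pvSize_of_bounds _ _ hm (by omega) (by omega)

theorem pvSize_run (t0 t1 : Nat) (h : t0 < t1) : Nat.size (2 ^ t1 - 2 ^ t0) = t1 := by
  have hsplit : (2:Nat) ^ t1 = 2 ^ (t1 - t0) * 2 ^ t0 := by rw [← Nat.pow_add]; congr 1; omega
  have h1 : 2 ^ t1 - 2 ^ t0 = (2 ^ (t1 - t0) - 1) * 2 ^ t0 + 0 := by
    rw [Nat.sub_mul, one_mul, ← hsplit]; omega
  have h2 : (2:Nat) ≤ 2 ^ (t1 - t0) := by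
    calc (2:Nat) = 2 ^ 1 := rfl
      _ ≤ 2 ^ (t1 - t0) := Nat.pow_le_pow_right (by omega) (by omega)
  rw [h1, pvSize_decomp _ _ _ (by omega) (Nat.two_pow_pos t0), pvSize_pred_pow _ (by omega)]
  omega

theorem pvDiv_decomp (H k r : Nat) (hr : r < 2 ^ k) : (H * 2 ^ k + r) / 2 ^ k = H := by
  rw [Nat.mul_comm H, Nat.mul_add_div (Nat.two_pow_pos k), Nat.div_eq_of_lt hr]
  omega

theorem pvDiv_decomp' (H k r s : Nat) (hr : r < 2 ^ k) (hks : k ≤ s) :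
    (H * 2 ^ k + r) / 2 ^ s = H / 2 ^ (s - k) := by
  have h1 : (2:Nat) ^ s = 2 ^ k * 2 ^ (s - k) := by rw [← Nat.pow_add]; congr 1; omega
  rw [h1, ← Nat.div_div_eq_div_mul, pvDiv_decomp H k r hr]

-- one-step unfolding lemmas for the loop
theorem pvGo_exit (x m cur : Int) (h : ¬ (x < cur ∧ 0 < cur)) :
    pvGoB x m cur = if cur = x then m else -1 := by
  rw [pvGoB, dif_neg h]

theorem pvGoB_cont (x m cur : Int) (h : x < cur ∧ 0 < cur) :
    pvGoB x m cur = pvGoB x (cur + (cur - PySem.Int.band cur (cur - 1)))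
      (PySem.Int.band cur (cur + (cur - PySem.Int.band cur (cur - 1)))) := by
  rw [pvGoB, dif_pos h]


-- enough fuel: the fuel loop agrees with the well-founded loop
theorem pvGoBFuel_eq (f : Nat) : ∀ (x m cur : Int), cur.toNat < f → pvGoBFuel f x m cur = pvGoB x m cur := by
  induction f with
  | zero => intro x m cur h; omega
  | succ f ih =>
    intro x m cur h
    by_cases hc : x < cur ∧ 0 < cur
    · rw [show pvGoBFuel (f + 1) x m cur = if x < cur ∧ 0 < cur then
          pvGoBFuel f x (cur + (cur - PySem.Int.band cur (cur - 1)))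
            (PySem.Int.band cur (cur + (cur - PySem.Int.band cur (cur - 1))))
        else if cur = x then m else -1 from rfl,
        if_pos hc, pvGoB_cont x m cur hc]
      apply ih
      have := pvBandStep_toNat_lt cur hc.2
      omega
    · rw [show pvGoBFuel (f + 1) x m cur = if x < cur ∧ 0 < cur then
          pvGoBFuel f x (cur + (cur - PySem.Int.band cur (cur - 1)))
            (PySem.Int.band cur (cur + (cur - PySem.Int.band cur (cur - 1))))
        else if cur = x then m else -1 from rfl,
        if_neg hc, pvGo_exit x m cur hc]

-- one loop step, on the lowest-run decomposition
theorem pvGo_step (x m : Int) (H t0 t1 : Nat) (ht : t0 < t1) (hH : H % 2 = 0)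
    (hx : x < ((H * 2 ^ t1 + (2 ^ t1 - 2 ^ t0) : Nat) : Int)) :
    pvGoB x m ((H * 2 ^ t1 + (2 ^ t1 - 2 ^ t0) : Nat) : Int)
      = pvGoB x (((H + 1) * 2 ^ t1 : Nat) : Int) ((H * 2 ^ t1 : Nat) : Int) := by
  have ht0 : (0:Nat) < 2 ^ t0 := Nat.two_pow_pos t0
  have hlt : (2:Nat) ^ t0 < 2 ^ t1 := Nat.pow_lt_pow_right (by omega) ht
  set c : Nat := H * 2 ^ t1 + (2 ^ t1 - 2 ^ t0) with hc
  have hc0 : 0 < c := by omega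
  rw [pvGoB_cont x m (c : Int) ⟨hx, by exact_mod_cast hc0⟩]
  have h1 : PySem.Int.band (c : Int) ((c : Int) - 1) = ((c &&& (c - 1) : Nat) : Int) := by
    rw [show ((c:Int) - 1) = ((c - 1 : Nat) : Int) from by omega,
      PySem.Int.band_of_nonneg (by positivity) (by positivity), Int.toNat_natCast, Int.toNat_natCast]
  have h2 : c &&& (c - 1) = H * 2 ^ t1 + (2 ^ t1 - 2 ^ (t0 + 1)) := pvStep_and_pred H t0 t1 ht hH
  have e2 : (2:Nat) ^ (t0 + 1) = 2 * 2 ^ t0 := by ring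
  have hle : (2:Nat) ^ (t0 + 1) ≤ 2 ^ t1 := Nat.pow_le_pow_right (by omega) (by omega)
  have e3 : (H + 1) * 2 ^ t1 = H * 2 ^ t1 + 2 ^ t1 := by ring
  have h3 : (c : Int) + ((c : Int) - PySem.Int.band (c : Int) ((c : Int) - 1))
      = (((H + 1) * 2 ^ t1 : Nat) : Int) := by
    rw [h1, h2]; omega
  rw [h3]
  have h4 : PySem.Int.band (c : Int) (((H + 1) * 2 ^ t1 : Nat) : Int) = ((H * 2 ^ t1 : Nat) : Int) := by
    rw [PySem.Int.band_of_nonneg (by positivity) (by positivity), Int.toNat_natCast, Int.toNat_natCast,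
      pvStep_and_next H t0 t1 ht hH]
  rw [h4]

-- for x < 0 the loop runs the value down to 0 and returns -1
theorem pvGo_neg (x : Int) (hx : x < 0) : ∀ a : Nat, ∀ m : Int, pvGoB x m (a : Int) = -1 := by
  intro a
  induction a using Nat.strong_induction_on with
  | _ a ih =>
    intro m
    rcases Nat.eq_zero_or_pos a with h0 | h0
    · subst h0
      rw [pvGo_exit x m ((0 : Nat) : Int) (by intro h; omega), if_neg (by intro h; omega)]
    · obtain ⟨H, t0, t1, ht, hH, rfl⟩ := pvDeco a h0
      have ht0 : (0:Nat) < 2 ^ t0 := Nat.two_pow_pos t0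
      have hlt : (2:Nat) ^ t0 < 2 ^ t1 := Nat.pow_lt_pow_right (by omega) ht
      rw [pvGo_step x m H t0 t1 ht hH
        (by have := Int.natCast_nonneg (H * 2 ^ t1 + (2 ^ t1 - 2 ^ t0)); omega)]
      exact ih (H * 2 ^ t1) (by omega) _

-- case analysis of the bit form along one loop step
theorem pvCore_at (H t0 t1 : Nat) (ht : t0 < t1) (hH : H % 2 = 0) :
    pvCoreN (H * 2 ^ t1 + (2 ^ t1 - 2 ^ t0)) (H * 2 ^ t1) = (((H + 1) * 2 ^ t1 : Nat) : Int) := by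
  have ht0 : (0:Nat) < 2 ^ t0 := Nat.two_pow_pos t0
  have hlt : (2:Nat) ^ t0 < 2 ^ t1 := Nat.pow_lt_pow_right (by omega) ht
  have hrun_lt : 2 ^ t1 - 2 ^ t0 < 2 ^ t1 := by omega
  have hxor : (H * 2 ^ t1 + (2 ^ t1 - 2 ^ t0)) ^^^ (H * 2 ^ t1) = 2 ^ t1 - 2 ^ t0 := by
    have h := pvXor_decomp H H (2 ^ t1 - 2 ^ t0) 0 t1 hrun_lt (Nat.two_pow_pos t1)
    rw [Nat.xor_self, Nat.xor_zero, Nat.zero_mul, Nat.zero_add, Nat.add_zero] at h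
    exact h
  have hs : Nat.size ((H * 2 ^ t1 + (2 ^ t1 - 2 ^ t0)) ^^^ (H * 2 ^ t1)) = t1 := by
    rw [hxor]; exact pvSize_run t0 t1 ht
  simp only [pvCoreN, hs]
  rw [if_neg (by simp [Nat.mul_mod_left])]
  by_cases hH0 : H = 0
  · subst hH0
    have hsz : Nat.size (0 * 2 ^ t1 + (2 ^ t1 - 2 ^ t0)) = t1 := by
      rw [Nat.zero_mul, Nat.zero_add]; exact pvSize_run t0 t1 ht
    rw [if_pos hsz.symm, hsz]
    norm_num
  · have hsz : Nat.size (H * 2 ^ t1 + (2 ^ t1 - 2 ^ t0)) = Nat.size H + t1 :=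
      pvSize_decomp H t1 _ (by omega) hrun_lt
    have hsH : 0 < Nat.size H := Nat.size_pos.mpr (by omega)
    rw [if_neg (by omega)]
    have hdiv : (H * 2 ^ t1 + (2 ^ t1 - 2 ^ t0)) / 2 ^ t1 = H := pvDiv_decomp H t1 _ hrun_lt
    rw [if_neg (by rw [hdiv]; omega)]
    have hdiv2 : (H * 2 ^ t1 + (2 ^ t1 - 2 ^ t0)) / 2 ^ (t1 + 1) = H / 2 := by
      have := pvDiv_decomp' H t1 (2 ^ t1 - 2 ^ t0) (t1 + 1) hrun_lt (by omega)
      simpa using this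
    rw [hdiv2]
    congr 1
    have h2 : H / 2 * 2 = H := by omega
    have e : H / 2 * 2 ^ (t1 + 1) = H * 2 ^ t1 := by
      calc H / 2 * 2 ^ (t1 + 1) = (H / 2 * 2) * 2 ^ t1 := by ring
        _ = H * 2 ^ t1 := by rw [h2]
    have e3 : (H + 1) * 2 ^ t1 = H * 2 ^ t1 + 2 ^ t1 := by ring
    omega

theorem pvCore_step_lt (H t0 t1 b : Nat) (ht : t0 < t1) (hH : H % 2 = 0) (hb : b < H * 2 ^ t1) :
    pvCoreN (H * 2 ^ t1 + (2 ^ t1 - 2 ^ t0)) b = pvCoreN (H * 2 ^ t1) b := by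
  have ht0 : (0:Nat) < 2 ^ t0 := Nat.two_pow_pos t0
  have hlt : (2:Nat) ^ t0 < 2 ^ t1 := Nat.pow_lt_pow_right (by omega) ht
  have hH0 : 0 < H := by
    by_contra h
    have : H = 0 := by omega
    subst this
    simp at hb
  have hrun_lt : 2 ^ t1 - 2 ^ t0 < 2 ^ t1 := by omega
  have hbmod : b % 2 ^ t1 < 2 ^ t1 := Nat.mod_lt _ (Nat.two_pow_pos t1)
  have hbdec : b = b / 2 ^ t1 * 2 ^ t1 + b % 2 ^ t1 := by
    rw [Nat.mul_comm (b / 2 ^ t1) (2 ^ t1)]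
    exact (Nat.div_add_mod b (2 ^ t1)).symm
  have hq0 : H ^^^ (b / 2 ^ t1) ≠ 0 := by
    rw [ne_eq, Nat.xor_eq_zero_iff]
    intro hEq
    rw [← hEq] at hbdec
    omega
  have hxor_a : (H * 2 ^ t1 + (2 ^ t1 - 2 ^ t0)) ^^^ b
      = (H ^^^ b / 2 ^ t1) * 2 ^ t1 + ((2 ^ t1 - 2 ^ t0) ^^^ b % 2 ^ t1) := by
    conv_lhs => rw [hbdec]
    exact pvXor_decomp H (b / 2 ^ t1) _ _ t1 hrun_lt hbmod
  have hxor_c : (H * 2 ^ t1) ^^^ b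
      = (H ^^^ b / 2 ^ t1) * 2 ^ t1 + (0 ^^^ b % 2 ^ t1) := by
    conv_lhs => rw [show H * 2 ^ t1 = H * 2 ^ t1 + 0 from by omega, hbdec]
    exact pvXor_decomp H (b / 2 ^ t1) 0 _ t1 (Nat.two_pow_pos t1) hbmod
  have hxlt1 : (2 ^ t1 - 2 ^ t0) ^^^ b % 2 ^ t1 < 2 ^ t1 := Nat.xor_lt_two_pow hrun_lt hbmod
  have hxlt2 : 0 ^^^ b % 2 ^ t1 < 2 ^ t1 := Nat.xor_lt_two_pow (Nat.two_pow_pos t1) hbmod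
  have hq0' : 0 < H ^^^ (b / 2 ^ t1) := by omega
  have hs_a : Nat.size ((H * 2 ^ t1 + (2 ^ t1 - 2 ^ t0)) ^^^ b) = Nat.size (H ^^^ b / 2 ^ t1) + t1 := by
    rw [hxor_a]; exact pvSize_decomp _ _ _ hq0' hxlt1
  have hs_c : Nat.size ((H * 2 ^ t1) ^^^ b) = Nat.size (H ^^^ b / 2 ^ t1) + t1 := by
    rw [hxor_c]; exact pvSize_decomp _ _ _ hq0' hxlt2
  have hsq : 0 < Nat.size (H ^^^ b / 2 ^ t1) := Nat.size_pos.mpr hq0'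
  have hsize_a : Nat.size (H * 2 ^ t1 + (2 ^ t1 - 2 ^ t0)) = Nat.size H + t1 :=
    pvSize_decomp H t1 _ hH0 hrun_lt
  have hsize_c : Nat.size (H * 2 ^ t1) = Nat.size H + t1 := by
    conv_lhs => rw [show H * 2 ^ t1 = H * 2 ^ t1 + 0 from by omega]
    exact pvSize_decomp H t1 0 hH0 (Nat.two_pow_pos t1)
  have hd1 : (H * 2 ^ t1 + (2 ^ t1 - 2 ^ t0)) / 2 ^ (Nat.size (H ^^^ b / 2 ^ t1) + t1)
      = H / 2 ^ Nat.size (H ^^^ b / 2 ^ t1) := by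
    rw [pvDiv_decomp' H t1 _ _ hrun_lt (by omega),
      show Nat.size (H ^^^ b / 2 ^ t1) + t1 - t1 = Nat.size (H ^^^ b / 2 ^ t1) from by omega]
  have hd2 : (H * 2 ^ t1) / 2 ^ (Nat.size (H ^^^ b / 2 ^ t1) + t1)
      = H / 2 ^ Nat.size (H ^^^ b / 2 ^ t1) := by
    conv_lhs => rw [show H * 2 ^ t1 = H * 2 ^ t1 + 0 from by omega]
    rw [pvDiv_decomp' H t1 0 _ (Nat.two_pow_pos t1) (by omega),
      show Nat.size (H ^^^ b / 2 ^ t1) + t1 - t1 = Nat.size (H ^^^ b / 2 ^ t1) from by omega]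
  have hd3 : (H * 2 ^ t1 + (2 ^ t1 - 2 ^ t0)) / 2 ^ (Nat.size (H ^^^ b / 2 ^ t1) + t1 + 1)
      = H / 2 ^ (Nat.size (H ^^^ b / 2 ^ t1) + 1) := by
    rw [pvDiv_decomp' H t1 _ _ hrun_lt (by omega),
      show Nat.size (H ^^^ b / 2 ^ t1) + t1 + 1 - t1 = Nat.size (H ^^^ b / 2 ^ t1) + 1 from by omega]
  have hd4 : (H * 2 ^ t1) / 2 ^ (Nat.size (H ^^^ b / 2 ^ t1) + t1 + 1)
      = H / 2 ^ (Nat.size (H ^^^ b / 2 ^ t1) + 1) := by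
    conv_lhs => rw [show H * 2 ^ t1 = H * 2 ^ t1 + 0 from by omega]
    rw [pvDiv_decomp' H t1 0 _ (Nat.two_pow_pos t1) (by omega),
      show Nat.size (H ^^^ b / 2 ^ t1) + t1 + 1 - t1 = Nat.size (H ^^^ b / 2 ^ t1) + 1 from by omega]
  simp only [pvCoreN, hs_a, hs_c, hsize_a, hsize_c, hd1, hd2, hd3, hd4]

theorem pvCore_far (H t0 t1 b : Nat) (ht : t0 < t1) (hH : H % 2 = 0)
    (hlow : H * 2 ^ t1 < b) (hhigh : b < H * 2 ^ t1 + (2 ^ t1 - 2 ^ t0)) :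
    pvCoreN (H * 2 ^ t1 + (2 ^ t1 - 2 ^ t0)) b = -1 := by
  have ht0 : (0:Nat) < 2 ^ t0 := Nat.two_pow_pos t0
  have hlt : (2:Nat) ^ t0 < 2 ^ t1 := Nat.pow_lt_pow_right (by omega) ht
  have hrun_lt : 2 ^ t1 - 2 ^ t0 < 2 ^ t1 := by omega
  set a := H * 2 ^ t1 + (2 ^ t1 - 2 ^ t0) with ha
  have hu0 : a ^^^ b ≠ 0 := by rw [ne_eq, Nat.xor_eq_zero_iff]; omega
  set s := Nat.size (a ^^^ b) with hs
  have hs0 : 0 < s := Nat.size_pos.mpr (by omega)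
  by_cases hbm : b % 2 ^ s = 0
  · -- b agrees with a above the divergence and is 0 at and below it
    have hu_lt : a ^^^ b < 2 ^ s := Nat.lt_size_self _
    have hdveq : a / 2 ^ s = b / 2 ^ s := by
      have h3 : (a ^^^ b) >>> s = 0 := by
        rw [Nat.shiftRight_eq_div_pow]; exact Nat.div_eq_of_lt hu_lt
      rw [Nat.shiftRight_xor_distrib] at h3
      have h4 := Nat.xor_eq_zero_iff.mp h3
      rwa [Nat.shiftRight_eq_div_pow, Nat.shiftRight_eq_div_pow] at h4
    have hbdec : b = a / 2 ^ s * 2 ^ s := by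
      have h5 := Nat.div_add_mod b (2 ^ s)
      have h6 : b = 2 ^ s * (b / 2 ^ s) := by omega
      rw [h6, Nat.mul_comm, hdveq]
    have hslt : s < t1 := by
      rcases Nat.lt_or_ge s t1 with h | h
      · exact h
      · exfalso
        have h6 : a / 2 ^ s = H / 2 ^ (s - t1) := pvDiv_decomp' H t1 _ s hrun_lt h
        have h7 : H / 2 ^ (s - t1) * 2 ^ (s - t1) ≤ H := Nat.div_mul_le_self _ _
        have h8 : (2:Nat) ^ s = 2 ^ (s - t1) * 2 ^ t1 := by rw [← Nat.pow_add]; congr 1; omega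
        have h9 : b ≤ H * 2 ^ t1 := by
          rw [hbdec, h6, h8, ← Nat.mul_assoc]
          exact Nat.mul_le_mul_right _ h7
        omega
    have hu_top : 2 ^ (s - 1) ≤ a ^^^ b := (Nat.lt_size).mp (by omega)
    have hu_div : (a ^^^ b) / 2 ^ (s - 1) = 1 := by
      apply Nat.div_eq_of_lt_le
      · simpa using hu_top
      · have h2 : (2:Nat) ^ s = 2 * 2 ^ (s - 1) := by rw [← Nat.pow_succ']; congr 1; omega
        omega
    have hb_even : b / 2 ^ (s - 1) % 2 = 0 := by
      have h8 : (2:Nat) ^ s = 2 ^ (s - 1) * 2 := by rw [← Nat.pow_succ]; congr 1; omega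
      rw [hbdec, h8, show a / (2 ^ (s - 1) * 2) * (2 ^ (s - 1) * 2) = (a / (2 ^ (s - 1) * 2) * 2) * 2 ^ (s - 1) from by ring,
        Nat.mul_div_cancel _ (Nat.two_pow_pos (s - 1))]
      omega
    have ha_bit : a / 2 ^ (s - 1) % 2 = 1 := by
      have tb1 : (a ^^^ b).testBit (s - 1) = true := by
        rw [Nat.testBit_eq_decide_div_mod_eq, hu_div]
        simp
      have tb2 : b.testBit (s - 1) = false := by
        rw [Nat.testBit_eq_decide_div_mod_eq, hb_even]
        simp
      have tb3 := Nat.testBit_xor a b (s - 1)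
      rw [tb1, tb2] at tb3
      have tb4 : a.testBit (s - 1) = true := by
        cases h : a.testBit (s - 1)
        · rw [h] at tb3; simp at tb3
        · rfl
      rw [Nat.testBit_eq_decide_div_mod_eq] at tb4
      exact of_decide_eq_true tb4
    have hbit_a : ∀ j, j < t1 → (a / 2 ^ j % 2 = 1 ↔ t0 ≤ j) := by
      intro j hj
      have h1 : a.testBit j = (2 ^ t1 - 2 ^ t0).testBit j := by
        rw [ha, pvTestBit_decomp H _ t1 hrun_lt j, if_pos hj]
      rw [pvTestBit_run t0 t1 j (by omega), Nat.testBit_eq_decide_div_mod_eq] at h1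
      have h2 : (a / 2 ^ j % 2 = 1) ↔ (t0 ≤ j ∧ j < t1) := by
        constructor
        · intro hh
          have := h1 ▸ (decide_eq_true hh)
          exact of_decide_eq_true this
        · intro hh
          have := h1.symm ▸ (decide_eq_true hh)
          exact of_decide_eq_true this
      exact ⟨fun hh => (h2.mp hh).1, fun hh => h2.mpr ⟨hh, hj⟩⟩
    have ht0s : t0 ≤ s - 1 := (hbit_a (s - 1) (by omega)).mp ha_bit
    have hss : s ≠ t1 := by
      intro hEq
      rw [hEq] at hbdec
      rw [pvDiv_decomp H t1 _ hrun_lt] at hbdec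
      omega
    have ha_s : a / 2 ^ s % 2 = 1 := (hbit_a s (by omega)).mpr (by omega)
    have hsize_a_ge : t1 ≤ Nat.size a := by
      have h1 : 2 ^ t1 - 2 ^ t0 ≤ a := by omega
      calc t1 = Nat.size (2 ^ t1 - 2 ^ t0) := (pvSize_run t0 t1 ht).symm
        _ ≤ Nat.size a := Nat.size_le_size h1
    simp only [pvCoreN, ← hs]
    rw [if_neg (by omega), if_neg (by omega), if_pos ha_s]
  · simp only [pvCoreN, ← hs]
    rw [if_pos hbm]

-- the loop equals the bit form on 0 ≤ b < a
theorem pvGo_eq_core (a : Nat) : ∀ b : Nat, ∀ m : Int, b < a → pvGoB (b : Int) m (a : Int) = pvCoreN a b := by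
  induction a using Nat.strong_induction_on with
  | _ a ih =>
    intro b m hba
    obtain ⟨H, t0, t1, ht, hH, rfl⟩ := pvDeco a (by omega)
    have ht0 : (0:Nat) < 2 ^ t0 := Nat.two_pow_pos t0
    have hlt : (2:Nat) ^ t0 < 2 ^ t1 := Nat.pow_lt_pow_right (by omega) ht
    rw [pvGo_step _ m H t0 t1 ht hH (by exact_mod_cast hba)]
    rcases lt_trichotomy b (H * 2 ^ t1) with hc | hc | hc
    · rw [ih (H * 2 ^ t1) (by omega) b _ hc]
      exact (pvCore_step_lt H t0 t1 b ht hH hc).symm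
    · rw [pvGo_exit ((b : Nat) : Int) (((H + 1) * 2 ^ t1 : Nat) : Int) ((H * 2 ^ t1 : Nat) : Int)
        (by intro hcon
            have h1 : b < H * 2 ^ t1 := by exact_mod_cast hcon.1
            omega),
        if_pos (show ((H * 2 ^ t1 : Nat) : Int) = ((b : Nat) : Int) by exact_mod_cast hc.symm), hc]
      exact (pvCore_at H t0 t1 ht hH).symm
    · rw [pvGo_exit ((b : Nat) : Int) (((H + 1) * 2 ^ t1 : Nat) : Int) ((H * 2 ^ t1 : Nat) : Int)
        (by intro hcon
            have h1 : b < H * 2 ^ t1 := by exact_mod_cast hcon.1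
            omega),
        if_neg (show ¬ ((H * 2 ^ t1 : Nat) : Int) = ((b : Nat) : Int) by
          intro hcon
          have h1 : H * 2 ^ t1 = b := by exact_mod_cast hcon
          omega)]
      exact (pvCore_far H t0 t1 b ht hH hc hba).symm

-- the bit form, for 0 ≤ b < a, is pvCoreN
theorem pvAltBit_eq_core (a b : Nat) (h : b < a) : pvAltBit (a : Int) (b : Int) = pvCoreN a b := by
  have hne : (a : Int) ≠ (b : Int) := by
    intro hEq
    rw [Nat.cast_inj] at hEq
    omega
  have hD0 : a ^^^ b ≠ 0 := by rw [ne_eq, Nat.xor_eq_zero_iff]; omega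
  obtain ⟨s, hs⟩ : ∃ s, Nat.size (a ^^^ b) = s := ⟨_, rfl⟩
  have hs1 : 0 < s := by rw [← hs]; exact Nat.size_pos.mpr (by omega)
  have hps : s - 1 + 1 = s := by omega
  have hL1 : 0 < Nat.size a := Nat.size_pos.mpr (by omega)
  simp only [pvAltBit, if_neg hne]
  rw [if_neg (by push_cast; omega : ¬ ((b : Int) < 0 ∨ (a : Int) < (b : Int)))]
  simp only [PySem.Int.bxor_natCast, pvBitLength_natCast', hs, hps]
  have hmask : ((1 : Int) <<< s - 1) = ((2 ^ s - 1 : Nat) : Int) := by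
    rw [show ((1 : Int) <<< s) = ((1 <<< s : Nat) : Int) from rfl, Nat.one_shiftLeft]
    have := Nat.one_le_two_pow (n := s)
    omega
  have hband1 : PySem.Int.band (b : Int) ((1 : Int) <<< s - 1) = ((b % 2 ^ s : Nat) : Int) := by
    rw [hmask, PySem.Int.band_of_nonneg (by positivity) (by positivity),
      Int.toNat_natCast, Int.toNat_natCast, Nat.and_two_pow_sub_one_eq_mod]
  have hband2 : PySem.Int.band ((a : Int) >>> s) 1 = (((a >>> s) % 2 : Nat) : Int) := by
    rw [show ((a : Int) >>> s) = ((a >>> s : Nat) : Int) from rfl,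
      PySem.Int.band_of_nonneg (by positivity) (by norm_num), Int.toNat_natCast,
      show ((1 : Int)).toNat = 1 from rfl, Nat.and_one_is_mod]
  rw [hband1, hband2]
  simp only [pvCoreN, hs]
  by_cases h1 : b % 2 ^ s = 0
  · have p1 : ¬ (((b % 2 ^ s : Nat) : Int) ≠ 0) := by simp [h1]
    have p2 : ¬ (b % 2 ^ s ≠ 0) := by simp [h1]
    rw [if_neg p1, if_neg p2]
    by_cases h2 : s = Nat.size a
    · rw [if_pos (show s - 1 = Nat.size a - 1 by omega), if_pos h2,
        show ((1 : Int) <<< Nat.size a) = ((1 <<< Nat.size a : Nat) : Int) from rfl, Nat.one_shiftLeft]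
    · rw [if_neg (show ¬ s - 1 = Nat.size a - 1 by omega), if_neg h2]
      by_cases h3 : (a >>> s) % 2 = 1
      · have p3 : (((a >>> s) % 2 : Nat) : Int) ≠ 0 := by rw [h3]; simp
        have p4 : a / 2 ^ s % 2 = 1 := by rwa [Nat.shiftRight_eq_div_pow] at h3
        rw [if_pos p3, if_pos p4]
      · have h3' : (a >>> s) % 2 = 0 := by omega
        have p3 : ¬ ((((a >>> s) % 2 : Nat) : Int) ≠ 0) := by rw [h3']; simp
        have p4 : ¬ (a / 2 ^ s % 2 = 1) := by rw [Nat.shiftRight_eq_div_pow] at h3'; omega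
        rw [if_neg p3, if_neg p4]
        rw [show s - 1 + 2 = s + 1 from by omega,
          show ((a : Int) >>> (s + 1) <<< (s + 1)) = (((a >>> (s + 1)) <<< (s + 1) : Nat) : Int) from rfl,
          show ((1 : Int) <<< s) = ((1 <<< s : Nat) : Int) from rfl,
          Nat.one_shiftLeft, Nat.shiftLeft_eq, Nat.shiftRight_eq_div_pow]
        push_cast
        ring
  · rw [if_pos (Int.natCast_ne_zero.mpr h1), if_pos h1]

-- B equals the bit form on all of Pre_
theorem pvB_eq_bit (n x : Int) (hn : 0 ≤ n) : find_minimal_m_alt n x = pvAltBit n x := by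
  obtain ⟨a, rfl⟩ : ∃ a : Nat, n = (a : Int) := ⟨n.toNat, (Int.toNat_of_nonneg hn).symm⟩
  have hfuel : find_minimal_m_alt (a : Int) x = pvGoB x (a : Int) (a : Int) := by
    rw [find_minimal_m_alt]
    exact pvGoBFuel_eq _ _ _ _ (by simp)
  rw [hfuel]
  by_cases hEq : (a : Int) = x
  · rw [pvGo_exit x ((a : Nat) : Int) ((a : Nat) : Int) (by intro hcon; omega), if_pos hEq, pvAltBit, if_pos hEq]
  · by_cases hx : x < 0
    · rw [pvGo_neg x hx a, pvAltBit, if_neg hEq, if_pos (Or.inl hx)]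
    · obtain ⟨b, rfl⟩ : ∃ b : Nat, x = (b : Int) := ⟨x.toNat, (Int.toNat_of_nonneg (by omega)).symm⟩
      rcases lt_trichotomy b a with hba | hba | hba
      · rw [pvGo_eq_core a b _ hba, pvAltBit_eq_core a b hba]
      · exact absurd (by rw [hba]) hEq
      · rw [pvGo_exit ((b : Nat) : Int) ((a : Nat) : Int) ((a : Nat) : Int)
            (by intro hcon
                have h1 : b < a := by exact_mod_cast hcon.1
                omega),
          if_neg hEq, pvAltBit, if_neg hEq, if_pos (Or.inr (by exact_mod_cast hba))]


-- ===== VERDICT (by name: the statement is the Claim_ definition above) =====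
theorem find_minimal_m_spec : Claim_equal_find_minimal_m := by
  intro n x _ hpre
  unfold Spec_find_minimal_m
  rw [pvA_eq_bit n x hpre, pvB_eq_bit n x hpre]
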